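-- pv_equiv track=rewrite | github.com/vumaiha/subregular_learning | string-to-fo.py | wordmodel_lst_to_precedence
-- ===== SOURCE A (Python) =====
-- from itertools import permutations, repeat, product, chain, combinations
-- from string import ascii_uppercase
--
-- dummy_lst = list(ascii_uppercase) + list(''.join(words) for words in list(combinations(ascii_uppercase,2))) + list(''.join(words) for words in list(combinations(ascii_uppercase,3))) + list(''.join(words) for words in list(combinations(ascii_uppercase,4)))
--
-- def zip_nestedlst_lst(lst_of_lst,lst):
-- 	size = sum(len(sublst) for sublst in lst_of_lst)
-- 	j = 0
-- 	while j!=size: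
-- 		for l in lst_of_lst:
-- 			for i in range(len(l)):
-- 				l[i]=lst[j]
-- 				j += 1
-- 	return lst_of_lst
--
-- def wordmodel_lst_to_precedence(wordmodel_list):
-- 	precedence_list = []
-- 	variable_combos = []
-- 	abc_list = zip_nestedlst_lst(wordmodel_list,dummy_lst)
-- 	for abc in abc_list:
-- 		for i in permutations(abc,2):
-- 			variable_combos.append(i)
-- 	for i in variable_combos:
-- 		if dummy_lst.index(i[0]) < dummy_lst.index(i[1]):
-- 			precedence_list.append('follows(' + i[0] + ',' + i[1] + ')')
-- 	return precedence_list
-- ===== SOURCE B (Python) =====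
-- from itertools import combinations
-- from string import ascii_uppercase
--
-- dummy_lst = list(ascii_uppercase) + list(''.join(words) for words in list(combinations(ascii_uppercase,2))) + list(''.join(words) for words in list(combinations(ascii_uppercase,3))) + list(''.join(words) for words in list(combinations(ascii_uppercase,4)))
--
-- def wordmodel_lst_to_precedence(wordmodel_list):
-- 	# Single pass: assign each sublist its consecutive slice of dummy_lst and
-- 	# emit the pairs directly with combinations (already in index order), so no
-- 	# permutations pass, no filter and no repeated dummy_lst.index scans.
-- 	precedence_list = []
-- 	j = 0
-- 	for l in wordmodel_list:
-- 		k = len(l)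
-- 		l[:] = dummy_lst[j:j + k]
-- 		j += k
-- 		for a, b in combinations(l, 2):
-- 			precedence_list.append('follows(' + a + ',' + b + ')')
-- 	return precedence_list
-- ===== Notes on version B (the rewrite author's own statement) =====
-- stated objective: faster
-- what changed: One pass that slices each sublist's consecutive dummy_lst segment and emits pairs directly via combinations, removing the permutations pass, the filter branch and every dummy_lst.index scan (each a 17901-element search).
import Mathlib
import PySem

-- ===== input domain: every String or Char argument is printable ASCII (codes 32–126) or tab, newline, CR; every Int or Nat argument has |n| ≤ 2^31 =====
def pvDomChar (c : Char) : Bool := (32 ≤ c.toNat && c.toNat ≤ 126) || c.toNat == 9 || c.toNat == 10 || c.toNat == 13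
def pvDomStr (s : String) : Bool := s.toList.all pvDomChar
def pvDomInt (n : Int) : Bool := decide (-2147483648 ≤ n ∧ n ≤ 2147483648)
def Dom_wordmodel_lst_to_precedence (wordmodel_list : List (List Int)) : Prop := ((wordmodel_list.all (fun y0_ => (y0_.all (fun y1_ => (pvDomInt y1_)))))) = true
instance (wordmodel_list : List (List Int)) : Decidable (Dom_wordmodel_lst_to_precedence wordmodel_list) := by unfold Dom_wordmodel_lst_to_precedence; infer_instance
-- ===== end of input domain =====

-- B replaces A's permutations-then-filter-by-dummy_lst.index passes with a single pass that
-- slices each sublist's consecutive dummy_lst segment and emits pairs via combinations (faster: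
-- no per-pair index scan).  Equivalence is about the RETURN value: both Pythons also mutate
-- wordmodel_list in place (A element-wise, B by slice assignment) — identically inside Pre_.


-- ===== PORT A =====
-- list(ascii_uppercase): Python's one-character strings are modelled as Char;
-- ''.join(words) over a tuple of such letters is String.ofList of the chars.
def pvAsciiUpper : List Char :=
  ['A','B','C','D','E','F','G','H','I','J','K','L','M','N','O','P','Q','R','S','T','U','V','W','X','Y','Z']

-- dummy_lst = singles ++ joined 2-combinations ++ joined 3-combinations ++ joined 4-combinations
def pvDummyLst : List String :=
  pvAsciiUpper.map (fun c => String.ofList [c])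
  ++ (PySem.List.combinations pvAsciiUpper 2).map String.ofList
  ++ (PySem.List.combinations pvAsciiUpper 3).map String.ofList
  ++ (PySem.List.combinations pvAsciiUpper 4).map String.ofList

-- size = sum(len(sublst) for sublst in lst_of_lst)
def pvSize (lst_of_lst : List (List Int)) : Nat := (lst_of_lst.map List.length).sum

-- zip_nestedlst_lst: the while body runs exactly once when size > 0 (one full pass assigns
-- exactly size elements, so j == size afterwards) and zero times when size = 0 — and a pass
-- over only-empty sublists assigns nothing — so ONE unconditional pass is the same value.
-- l[i] = lst[j] with 0 ≤ j: getD is exact while j < len(dummy_lst), i.e. inside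
-- Pre_wordmodel_lst_to_precedence; past it Python raises IndexError (excluded by Pre_).
def pvZipGo (lst_of_lst : List (List Int)) (j : Nat) : List (List String) :=
  match lst_of_lst with
  | [] => []
  | l :: ls => ((List.range l.length).map (fun i => pvDummyLst.getD (j + i) "")) :: pvZipGo ls (j + l.length)

-- dummy_lst.index raises ValueError only when the value is absent; every value looked up here
-- was just copied out of dummy_lst, so index? is always some and .getD 0 is exact.
def wordmodel_lst_to_precedence (wordmodel_list : List (List Int)) : List String :=
  let abc_list := pvZipGo wordmodel_list 0
  let variable_combos :=
    abc_list.foldl (fun acc abc => (PySem.List.permutations abc 2).foldl (fun acc2 i => acc2 ++ [i]) acc) []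
  variable_combos.foldl (fun acc i =>
    if (PySem.List.index? pvDummyLst (i.getD 0 "")).getD 0 < (PySem.List.index? pvDummyLst (i.getD 1 "")).getD 0
    then acc ++ ["follows(" ++ i.getD 0 "" ++ "," ++ i.getD 1 "" ++ ")"] else acc) []

-- ===== PORT B =====
-- one pass: l[:] = dummy_lst[j:j+k]; emit pairs from combinations(l, 2) directly
def pvAltGo (lst : List (List Int)) (j : Nat) (out : List String) : List String :=
  match lst with
  | [] => out
  | l :: ls =>
    let s := PySem.List.slice pvDummyLst (some (j : Int)) (some ((j : Int) + (l.length : Int)))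
    pvAltGo ls (j + l.length)
      ((PySem.List.combinations s 2).foldl
        (fun acc c => acc ++ ["follows(" ++ c.getD 0 "" ++ "," ++ c.getD 1 "" ++ ")"]) out)

def wordmodel_lst_to_precedence_alt (wordmodel_list : List (List Int)) : List String :=
  pvAltGo wordmodel_list 0 []

-- ===== PRECONDITION & SPEC =====
-- Pre_ excludes exactly the inputs with more than 17901 (= len(dummy_lst)) elements in total,
-- on which A raises IndexError reading dummy_lst[j].
def Pre_wordmodel_lst_to_precedence (wordmodel_list : List (List Int)) : Prop :=
  pvSize wordmodel_list ≤ 17901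
instance (wordmodel_list : List (List Int)) : Decidable (Pre_wordmodel_lst_to_precedence wordmodel_list) := by unfold Pre_wordmodel_lst_to_precedence; infer_instance

def pvWitness_wordmodel_lst_to_precedence : List (List Int) := [[0], [1, 2]]

def Spec_wordmodel_lst_to_precedence (wordmodel_list : List (List Int)) (out : List String) : Prop := out = wordmodel_lst_to_precedence_alt wordmodel_list
instance (wordmodel_list : List (List Int)) (out : List String) : Decidable (Spec_wordmodel_lst_to_precedence wordmodel_list out) := by unfold Spec_wordmodel_lst_to_precedence; infer_instance

-- ===== CLAIM (what is proved, stated in full; the proofs are below) =====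
def Claim_equal_wordmodel_lst_to_precedence : Prop := ∀ (wordmodel_list : List (List Int)), Dom_wordmodel_lst_to_precedence wordmodel_list → Pre_wordmodel_lst_to_precedence wordmodel_list → Spec_wordmodel_lst_to_precedence wordmodel_list (wordmodel_lst_to_precedence wordmodel_list)

-- ===== LEMMAS AND PROOFS =====

-- |combinations xs r| = C(|xs|, r)
theorem pvCombLength {α : Type} : ∀ (xs : List α) (r : Nat),
    (PySem.List.combinations xs r).length = Nat.choose xs.length r := by
  intro xs
  induction xs with
  | nil => intro r; cases r <;> simp [PySem.List.combinations_zero, PySem.List.combinations_nil_succ]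
  | cons x xs ih =>
    intro r
    cases r with
    | zero => simp [PySem.List.combinations_zero]
    | succ r =>
      simp [PySem.List.combinations_cons_succ, ih, Nat.choose_succ_succ]

-- combinations of a duplicate-free list are pairwise distinct
theorem pvCombNodup {α : Type} [DecidableEq α] : ∀ (xs : List α), xs.Nodup →
    ∀ r, (PySem.List.combinations xs r).Nodup := by
  intro xs
  induction xs with
  | nil =>
    intro _ r; cases r <;> simp [PySem.List.combinations_zero, PySem.List.combinations_nil_succ]
  | cons x xs ih =>
    intro h r
    have hx : x ∉ xs := (List.nodup_cons.mp h).1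
    have hxs : xs.Nodup := (List.nodup_cons.mp h).2
    cases r with
    | zero => simp [PySem.List.combinations_zero]
    | succ r =>
      rw [PySem.List.combinations_cons_succ, List.nodup_append]
      refine ⟨(ih hxs r).map (fun _ _ h => by injection h), ih hxs (r+1), ?_⟩
      intro a ha b hb hab
      subst hab
      rcases List.mem_map.mp ha with ⟨c, _, rfl⟩
      have hs := PySem.List.sublist_of_mem_combinations hb
      exact hx (hs.mem List.mem_cons_self)

theorem pvDummyNodup : pvDummyLst.Nodup := by
  have hA : pvAsciiUpper.Nodup := by decide
  have hinj : Function.Injective String.ofList := by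
    intro a b h
    have := congrArg String.toList h
    simpa using this
  have block : ∀ r : Nat, ((PySem.List.combinations pvAsciiUpper r).map String.ofList).Nodup :=
    fun r => (pvCombNodup pvAsciiUpper hA r).map (fun _ _ h => hinj h)
  have blen : ∀ (r : Nat) (s : String), s ∈ (PySem.List.combinations pvAsciiUpper r).map String.ofList →
      s.toList.length = r := by
    intro r s hs
    rcases List.mem_map.mp hs with ⟨c, hc, rfl⟩
    rw [String.toList_ofList]; exact PySem.List.length_of_mem_combinations hc
  have b1len : ∀ s : String, s ∈ pvAsciiUpper.map (fun c => String.ofList [c]) → s.toList.length = 1 := by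
    intro s hs
    rcases List.mem_map.mp hs with ⟨c, _, rfl⟩
    simp
  have b1 : (pvAsciiUpper.map (fun c => String.ofList [c])).Nodup := by
    refine hA.map ?_
    intro a b h
    have := congrArg String.toList h
    simp at this; exact this
  unfold pvDummyLst
  simp only [List.append_assoc]
  rw [List.nodup_append, List.nodup_append, List.nodup_append]
  refine ⟨b1, ⟨block 2, ⟨block 3, block 4, ?_⟩, ?_⟩, ?_⟩
  · intro a ha b hb hab; subst hab
    have := blen 3 a ha; have := blen 4 a hb; omega
  · intro a ha b hb hab; subst hab
    rcases List.mem_append.mp hb with hb | hb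
    · have := blen 2 a ha; have := blen 3 a hb; omega
    · have := blen 2 a ha; have := blen 4 a hb; omega
  · intro a ha b hb hab; subst hab
    rcases List.mem_append.mp hb with hb | hb
    · have := b1len a ha; have := blen 2 a hb; omega
    rcases List.mem_append.mp hb with hb | hb
    · have := b1len a ha; have := blen 3 a hb; omega
    · have := b1len a ha; have := blen 4 a hb; omega

theorem pvDummyLength : pvDummyLst.length = 17901 := by
  have h26 : pvAsciiUpper.length = 26 := by decide
  simp [pvDummyLst, pvCombLength, h26]
  decide

-- first occurrence of l[p] in a duplicate-free l is p
theorem pvIndexGetElem {α : Type} [DecidableEq α] (l : List α) (h : l.Nodup) (p : Nat)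
    (hp : p < l.length) : PySem.List.index? l l[p] = some p := by
  rw [PySem.List.index?_eq_some_iff]
  refine ⟨l.take p, l.drop (p+1), ?_, by simp [hp.le], ?_⟩
  · rw [List.getElem_cons_drop, List.take_append_drop]
  · intro hv
    have h2 : l[p] ∈ l.drop p := by rw [← List.getElem_cons_drop]; exact List.mem_cons_self
    have h3 := (List.take_append_drop p l) ▸ h
    rw [List.nodup_append] at h3
    exact h3.2.2 _ hv _ h2 rfl

-- A's per-sublist reads [xs[j], xs[j+1], …] are the slice xs[j:j+k]
theorem pvSegEq {α : Type} (xs : List α) (d : α) (j k : Nat)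
    (h : j + k ≤ xs.length) :
    (List.range k).map (fun i => xs.getD (j + i) d) = (xs.drop j).take k := by
  apply List.ext_getElem
  · simp; omega
  · intro i h1 h2
    simp only [List.getElem_map, List.getElem_range, List.getElem_take, List.getElem_drop]
    exact List.getD_eq_getElem xs d (by simp at h1; omega)

-- structural equation of PySem.List.permutations (its definition unfolded)
theorem pvPermsSucc {α : Type} (xs : List α) (r : Nat) :
    PySem.List.permutations xs (r+1) =
      (List.range xs.length).flatMap (fun i =>
        match xs[i]? with
        | none => []
        | some x => (PySem.List.permutations (xs.eraseIdx i) r).map (fun p => x :: p)) := by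
  rw [PySem.List.permutations]
  rfl

theorem pvMapGetDRange {α : Type} (ys : List α) (d : α) :
    (List.range ys.length).map (fun i => ys.getD i d) = ys := by
  apply List.ext_getElem
  · simp
  · intro i h1 h2
    simp only [List.getElem_map, List.getElem_range]
    exact List.getD_eq_getElem ys d h2

theorem pvPermsOne {α : Type} [Inhabited α] (ys : List α) :
    PySem.List.permutations ys 1 = ys.map (fun y => [y]) := by
  rw [pvPermsSucc]
  have hcongr : ∀ i ∈ List.range ys.length,
      (match ys[i]? with
        | none => ([] : List (List α))
        | some x => (PySem.List.permutations (ys.eraseIdx i) 0).map (fun p => x :: p)) =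
      [[ys.getD i default]] := by
    intro i hi
    have hilt : i < ys.length := List.mem_range.mp hi
    simp [List.getElem?_eq_getElem hilt]
  rw [List.flatMap_congr hcongr, ← List.map_eq_flatMap]
  rw [show (fun i => [ys.getD i default]) = ((fun y => [y]) ∘ fun i => ys.getD i default) from rfl]
  rw [← List.map_map, pvMapGetDRange]

-- permutations xs 2 as a flatMap over the first index, match-free
theorem pvPermsTwoForm {α : Type} [Inhabited α] (s : List α) :
    PySem.List.permutations s 2 =
      (List.range s.length).flatMap (fun i =>
        (s.eraseIdx i).map (fun y => [s.getD i default, y])) := by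
  rw [pvPermsSucc]
  apply List.flatMap_congr
  intro i hi
  have hilt : i < s.length := List.mem_range.mp hi
  rw [List.getD_eq_getElem s default hilt]
  simp [List.getElem?_eq_getElem hilt, pvPermsOne, List.map_map, Function.comp_def]

-- combinations xs 2 as a flatMap over the first index, match-free
theorem pvCombTwoForm {α : Type} [Inhabited α] : ∀ (s : List α),
    PySem.List.combinations s 2 =
      (List.range s.length).flatMap (fun i =>
        (s.drop (i+1)).map (fun y => [s.getD i default, y])) := by
  intro s
  induction s with
  | nil => simp [PySem.List.combinations_nil_succ]
  | cons x t ih =>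
    rw [PySem.List.combinations_cons_succ, PySem.List.combinations_one]
    rw [List.length_cons, List.range_succ_eq_map, List.flatMap_cons, List.flatMap_map]
    simp only [List.getD_cons_zero, List.drop_succ_cons, List.drop_zero, List.map_map,
               Nat.succ_eq_add_one, List.getD_cons_succ]
    rw [ih]
    rfl

-- the heart: filtering all ordered pairs by "position of first < position of second in
-- dummy_lst" keeps exactly the combinations, in the same order
theorem pvFilterPerms {α : Type} [Inhabited α] (q : α → α → Bool) (s : List α)
    (hq : ∀ (i1 i2 : Nat) (h1 : i1 < s.length) (h2 : i2 < s.length),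
      q s[i1] s[i2] = decide (i1 < i2)) :
    (PySem.List.permutations s 2).filter (fun p => q (p.getD 0 default) (p.getD 1 default)) =
      PySem.List.combinations s 2 := by
  rw [pvPermsTwoForm, pvCombTwoForm, List.filter_flatMap]
  apply List.flatMap_congr
  intro i hi
  have hilt : i < s.length := List.mem_range.mp hi
  rw [List.filter_map]
  rw [show ((fun p => q (p.getD 0 default) (p.getD 1 default)) ∘ fun y => [s.getD i default, y]) =
        (fun y => q (s.getD i default) y) from rfl]
  rw [List.getD_eq_getElem s default hilt]
  rw [List.eraseIdx_eq_take_drop_succ, List.filter_append]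
  have htake : (s.take i).filter (fun y => q s[i] y) = [] := by
    rw [List.filter_eq_nil_iff]
    intro y hy
    rw [List.mem_take_iff_getElem] at hy
    rcases hy with ⟨i2, hi2, rfl⟩
    have h2 : i2 < s.length := by omega
    rw [hq i i2 hilt h2]
    simp; omega
  have hdrop : (s.drop (i+1)).filter (fun y => q s[i] y) = s.drop (i+1) := by
    apply List.filter_eq_self.mpr
    intro y hy
    rw [List.mem_iff_getElem] at hy
    rcases hy with ⟨i2, hi2, rfl⟩
    have h2 : i + 1 + i2 < s.length := by
      have := hi2; rw [List.length_drop] at this; omega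
    rw [show (s.drop (i+1))[i2]'hi2 = s[i+1+i2] from List.getElem_drop]
    rw [hq i (i+1+i2) hilt h2]
    simp
    omega
  rw [htake, hdrop, List.nil_append]

-- per-segment hypothesis of pvFilterPerms, from Nodup of dummy_lst
theorem pvSegHyp (j k : Nat) (h : j + k ≤ pvDummyLst.length) :
    ∀ (i1 i2 : Nat) (h1 : i1 < ((pvDummyLst.drop j).take k).length)
      (h2 : i2 < ((pvDummyLst.drop j).take k).length),
      (decide ((PySem.List.index? pvDummyLst (((pvDummyLst.drop j).take k)[i1])).getD 0 <
               (PySem.List.index? pvDummyLst (((pvDummyLst.drop j).take k)[i2])).getD 0))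
        = decide (i1 < i2) := by
  intro i1 i2 h1 h2
  have hl : ((pvDummyLst.drop j).take k).length = k := by simp; omega
  have hk1 : i1 < k := hl ▸ h1
  have hk2 : i2 < k := hl ▸ h2
  have e1 : ((pvDummyLst.drop j).take k)[i1] = pvDummyLst[j + i1]'(by omega) := by
    rw [show ((pvDummyLst.drop j).take k)[i1] = (pvDummyLst.drop j)[i1]'(by simp; omega) from
      List.getElem_take]
    rw [List.getElem_drop]
  have e2 : ((pvDummyLst.drop j).take k)[i2] = pvDummyLst[j + i2]'(by omega) := by
    rw [show ((pvDummyLst.drop j).take k)[i2] = (pvDummyLst.drop j)[i2]'(by simp; omega) from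
      List.getElem_take]
    rw [List.getElem_drop]
  rw [e1, e2, pvIndexGetElem _ pvDummyNodup (j + i1) (by omega),
      pvIndexGetElem _ pvDummyNodup (j + i2) (by omega)]
  simp only [Option.getD_some]
  by_cases hlt : i1 < i2 <;> simp [hlt]

-- B's tail-recursive accumulator, unfolded
theorem pvAltGoAcc : ∀ (ls : List (List Int)) (j : Nat) (out : List String),
    pvAltGo ls j out = out ++ pvAltGo ls j [] := by
  intro ls
  induction ls with
  | nil => intro j out; simp [pvAltGo]
  | cons l t ih =>
    intro j out
    simp only [pvAltGo]
    rw [PySem.List.foldl_append_singleton_eq_map, PySem.List.foldl_append_singleton_eq_map,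
        ih (j + l.length), ih (j + l.length) (([] : List String) ++ _)]
    simp [List.append_assoc]

-- the main loop equivalence, generalized over the running offset
theorem pvGoEq : ∀ (ls : List (List Int)) (j : Nat),
    j + pvSize ls ≤ pvDummyLst.length →
    ((pvZipGo ls j).flatMap (fun abc =>
        ((PySem.List.permutations abc 2).filter (fun i =>
            decide ((PySem.List.index? pvDummyLst (i.getD 0 "")).getD 0 <
                    (PySem.List.index? pvDummyLst (i.getD 1 "")).getD 0))).map
          (fun i => "follows(" ++ i.getD 0 "" ++ "," ++ i.getD 1 "" ++ ")"))) =
      pvAltGo ls j [] := by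
  intro ls
  induction ls with
  | nil => intro j _; simp [pvZipGo, pvAltGo]
  | cons l t ih =>
    intro j h
    have hsz : pvSize (l :: t) = l.length + pvSize t := by simp [pvSize]
    have hb : j + l.length ≤ pvDummyLst.length := by rw [hsz] at h; omega
    simp only [pvZipGo, List.flatMap_cons, pvAltGo]
    rw [PySem.List.foldl_append_singleton_eq_map, List.nil_append]
    rw [pvAltGoAcc t (j + l.length)]
    rw [← ih (j + l.length) (by rw [hsz] at h; omega)]
    congr 1
    rw [pvSegEq pvDummyLst "" j l.length hb]
    rw [PySem.List.slice_natCast_add]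
    congr 1
    exact pvFilterPerms
      (q := fun a b => decide ((PySem.List.index? pvDummyLst a).getD 0 <
                               (PySem.List.index? pvDummyLst b).getD 0))
      _ (pvSegHyp j l.length hb)

-- ===== VERDICT (by name: the statement is the Claim_ definition above) =====
theorem wordmodel_lst_to_precedence_spec : Claim_equal_wordmodel_lst_to_precedence := by
  intro wl _ hpre
  unfold Spec_wordmodel_lst_to_precedence
  unfold wordmodel_lst_to_precedence wordmodel_lst_to_precedence_alt
  simp only []
  have h1 : List.foldl (fun acc abc =>
        List.foldl (fun acc2 i => acc2 ++ [i]) acc (PySem.List.permutations abc 2)) []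
        (pvZipGo wl 0) =
      List.foldl (fun acc abc => acc ++ PySem.List.permutations abc 2) [] (pvZipGo wl 0) :=
    PySem.List.foldl_congr_mem (pvZipGo wl 0) _ _ []
      (fun acc abc _ => by rw [PySem.List.foldl_append_singleton_eq_self])
  rw [h1, PySem.List.foldl_append_eq_flatMap, List.nil_append]
  rw [PySem.List.foldl_append_ite
      (p := fun (i : List String) =>
        (PySem.List.index? pvDummyLst (i.getD 0 "")).getD 0 <
        (PySem.List.index? pvDummyLst (i.getD 1 "")).getD 0)
      (f := fun i => "follows(" ++ i.getD 0 "" ++ "," ++ i.getD 1 "" ++ ")")]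
  rw [List.nil_append, List.filter_flatMap, List.map_flatMap]
  exact pvGoEq wl 0 (by
    have := pvDummyLength
    unfold Pre_wordmodel_lst_to_precedence at hpre
    omega)
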